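-- pv_equiv track=rewrite | github.com/cwaldbieser/aoc | 2022/day17.py | find_first_cycle
-- ===== SOURCE A (Python) =====
-- def find_first_cycle(chamber, cycle_size):
--     """
--     Find the first cycle.
--     """
--     segment = chamber[cycle_size:]
--     start_idx0 = None
--     count = 0
--     for rownum, (row, rowahead) in enumerate(zip(chamber, segment)):
--         if row == rowahead:
--             if start_idx0 is None:
--                 start_idx0 = rownum
--             count += 1
--             if count == cycle_size:
--                 return start_idx0
--         else:
--             start_idx0 = None
--             count = 0
--     return None
-- ===== SOURCE B (Python) =====
-- def find_first_cycle(chamber, cycle_size):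
--     """
--     Find the first cycle: precompute the match table, then scan candidate
--     window starts (a cycle of non-positive size never exists).
--     """
--     if cycle_size <= 0:
--         return None
--     n = len(chamber)
--     matches = [chamber[i] == chamber[i + cycle_size] for i in range(n - cycle_size)]
--     for start in range(len(matches) - cycle_size + 1):
--         if all(matches[start:start + cycle_size]):
--             return start
--     return None
-- ===== Notes on version B (the rewrite author's own statement) =====
-- stated objective: alternative
-- what changed: A's single pass with a running match counter and reset-on-mismatch is replaced by precomputing the match table chamber[i]==chamber[i+cycle_size] and scanning candidate start positions for the first all-true window of length cycle_size.
import Mathlib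
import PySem

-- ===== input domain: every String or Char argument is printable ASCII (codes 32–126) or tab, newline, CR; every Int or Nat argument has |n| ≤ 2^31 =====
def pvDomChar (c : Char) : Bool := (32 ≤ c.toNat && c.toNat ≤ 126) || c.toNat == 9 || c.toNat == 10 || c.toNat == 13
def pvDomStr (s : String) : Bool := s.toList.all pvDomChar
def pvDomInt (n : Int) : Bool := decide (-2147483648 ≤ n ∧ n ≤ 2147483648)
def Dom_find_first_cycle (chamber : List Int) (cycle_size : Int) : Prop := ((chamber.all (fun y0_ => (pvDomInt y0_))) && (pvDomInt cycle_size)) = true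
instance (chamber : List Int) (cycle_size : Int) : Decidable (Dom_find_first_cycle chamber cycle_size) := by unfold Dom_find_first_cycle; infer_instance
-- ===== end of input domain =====

-- B replaces A's single-pass run-length counter with a precomputed match table
-- plus a first-all-true-window scan (objective: alternative; same result).

-- ===== PORT A =====
-- A's for-loop: state (start_idx0, count), early return when count == cycle_size
def pvLoopA : List (Int × Int × Int) → Option Int → Int → Int → Option Int
  | [], _, _, _ => none
  | (rownum, row, rowahead) :: rest, start_idx0, count, cycle_size =>
    if row == rowahead then
      let start_idx0 := match start_idx0 with
        | none => some rownum
        | some s => some s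
      let count := count + 1
      if count == cycle_size then start_idx0
      else pvLoopA rest start_idx0 count cycle_size
    else pvLoopA rest none 0 cycle_size

def find_first_cycle (chamber : List Int) (cycle_size : Int) : Option Int :=
  let segment := PySem.List.slice chamber (some cycle_size) none
  pvLoopA (PySem.List.enumerate (List.zip chamber segment) 0) none 0 cycle_size

-- ===== PORT B =====
-- B's for-loop: scan candidate starts, return the first all-true window
def pvLoopB (matchTable : List Bool) (cycle_size : Int) : List Int → Option Int
  | [] => none
  | start :: rest =>
    if (PySem.List.slice matchTable (some start) (some (start + cycle_size))).all id
    then some start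
    else pvLoopB matchTable cycle_size rest

def find_first_cycle_alt (chamber : List Int) (cycle_size : Int) : Option Int :=
  if cycle_size ≤ 0 then none
  else
    let n : Int := chamber.length
    let matchTable := (PySem.List.pyRange 0 (n - cycle_size) 1).map
      (fun i => PySem.List.pyGetD chamber i 0 == PySem.List.pyGetD chamber (i + cycle_size) 0)
    pvLoopB matchTable cycle_size
      (PySem.List.pyRange 0 ((matchTable.length : Int) - cycle_size + 1) 1)

-- ===== PRECONDITION & SPEC =====
def Spec_find_first_cycle (chamber : List Int) (cycle_size : Int) (out : Option Int) : Prop := out = find_first_cycle_alt chamber cycle_size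
instance (chamber : List Int) (cycle_size : Int) (out : Option Int) : Decidable (Spec_find_first_cycle chamber cycle_size out) := by unfold Spec_find_first_cycle; infer_instance

-- ===== CLAIM (what is proved, stated in full; the proofs are below) =====
def Claim_equal_find_first_cycle : Prop := ∀ (chamber : List Int) (cycle_size : Int), Dom_find_first_cycle chamber cycle_size → Spec_find_first_cycle chamber cycle_size (find_first_cycle chamber cycle_size)

-- ===== LEMMAS AND PROOFS =====

-- canonical middle form: index of the first all-true window of length k, if any
def pvFirstWin (k : Nat) : List Bool → Option Nat
  | [] => none
  | b :: rest =>
    if k ≤ (b :: rest).length ∧ ((b :: rest).take k).all id then some 0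
    else (pvFirstWin k rest).map (· + 1)

theorem pvFirstWin_none_of_short {k : Nat} {M : List Bool} (h : M.length < k) :
    pvFirstWin k M = none := by
  induction M with
  | nil => rfl
  | cons b rest ih =>
    simp only [pvFirstWin]
    rw [if_neg (by rintro ⟨h1, -⟩; omega)]
    rw [ih (by simp at h ⊢; omega)]
    rfl

theorem pvFirstWin_eq_some_zero {k : Nat} {M : List Bool} (hne : M ≠ [])
    (hk : k ≤ M.length) (hall : (M.take k).all id = true) :
    pvFirstWin k M = some 0 := by
  cases M with
  | nil => exact absurd rfl hne
  | cons b rest => simp only [pvFirstWin]; rw [if_pos ⟨hk, hall⟩]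

theorem pvTake_all_false : ∀ (c k : Nat) (r : List Bool), c < k →
    ((List.replicate c true ++ false :: r).take k).all id = false := by
  intro c
  induction c with
  | zero =>
    intro k r hk
    cases k with
    | zero => omega
    | succ k' => simp
  | succ c ih =>
    intro k r hk
    cases k with
    | zero => omega
    | succ k' =>
      rw [List.replicate_succ]
      simp only [List.cons_append, List.take_succ_cons, List.all_cons]
      rw [ih k' r (by omega)]
      rfl

theorem pvFirstWin_skip_false {k : Nat} (hk : 1 ≤ k) : ∀ (c : Nat) (r : List Bool), c < k →
    pvFirstWin k (List.replicate c true ++ false :: r)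
      = (pvFirstWin k r).map (· + (c + 1)) := by
  intro c
  induction c with
  | zero =>
    intro r _
    simp only [List.replicate, List.nil_append, pvFirstWin]
    rw [if_neg (by
      rintro ⟨-, h⟩
      cases k with
      | zero => omega
      | succ k' => simp at h)]
  | succ c ih =>
    intro r hc
    rw [List.replicate_succ]
    simp only [List.cons_append, pvFirstWin]
    rw [if_neg (by rw [show (true :: (List.replicate c true ++ false :: r)).take k
          = (List.replicate (c+1) true ++ false :: r).take k by rw [List.replicate_succ]; simp,
        pvTake_all_false (c+1) k r hc]; simp)]
    rw [ih r (by omega)]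
    cases pvFirstWin k r
    · rfl
    · simp; omega

-- A's loop on pairs whose match-list is L computes the first all-true window
-- of (c trues) ++ L, shifted to absolute positions.
theorem pvLoopA_inv {k : Nat} (hk : 1 ≤ k) :
    ∀ (l : List (Int × Int)) (p c : Nat), c < k →
    pvLoopA (PySem.List.enumerate l (p : Int))
        (if c = 0 then none else some ((p : Int) - (c : Int))) (c : Int) (k : Int)
      = (pvFirstWin k (List.replicate c true ++ l.map (fun q => q.1 == q.2))).map
          (fun i => (p : Int) - (c : Int) + (i : Int)) := by
  intro l
  induction l with
  | nil =>
    intro p c hc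
    rw [pvFirstWin_none_of_short (by simp; omega)]
    simp [PySem.List.enumerate_nil, pvLoopA]
  | cons q t ih =>
    intro p c hc
    obtain ⟨a, b⟩ := q
    rw [PySem.List.enumerate_cons]
    simp only [pvLoopA, List.map_cons]
    by_cases hab : (a == b) = true
    · rw [if_pos hab, hab]
      have hstart : (match (if c = 0 then none else some ((p : Int) - (c : Int))) with
          | none => some ((p : Int)) | some s => some s) = some ((p : Int) - (c : Int)) := by
        by_cases hc0 : c = 0 <;> simp [hc0]
      rw [hstart]
      by_cases hck : ((c : Int) + 1 == (k : Int)) = true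
      · rw [if_pos hck]
        have hceq : c + 1 = k := by
          have := of_decide_eq_true hck
          exact_mod_cast this
        rw [pvFirstWin_eq_some_zero (by simp) (by simp; omega)
          (by subst hceq; rw [List.take_append]; simp)]
        simp
      · rw [if_neg hck]
        have hc1k : c + 1 < k := by
          have hne : c + 1 ≠ k := by
            intro h
            apply absurd hck
            simp only [not_not]
            subst h
            push_cast
            simp
          omega
        have := ih (p + 1) (c + 1) hc1k
        rw [if_neg (by omega)] at this
        rw [show List.replicate (c+1) true ++ t.map (fun q => q.1 == q.2)
            = List.replicate c true ++ true :: t.map (fun q => q.1 == q.2) by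
          rw [List.replicate_succ']; simp] at this
        push_cast at this
        rw [show ((p : Int) - (c : Int)) = (p : Int) + 1 - ((c : Int) + 1) by ring]
        exact this
    · rw [if_neg hab]
      have hL : (a == b) = false := by simpa using hab
      have := ih (p + 1) 0 (by omega)
      rw [if_pos rfl] at this
      simp only [List.replicate, List.nil_append, Nat.cast_zero, sub_zero] at this
      push_cast at this
      rw [this, hL, pvFirstWin_skip_false hk c _ hc]
      cases pvFirstWin k (t.map (fun q => q.1 == q.2))
      · rfl
      · simp; ring

-- B's loop from start position j computes the first all-true window of drop j M,
-- shifted to absolute positions.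
theorem pvLoopB_inv {k : Nat} (hk : 1 ≤ k) (M : List Bool) :
    ∀ (t j : Nat), M.length ≤ j + t →
    pvLoopB M (k : Int) (PySem.List.pyRange (j : Int) ((M.length : Int) - (k : Int) + 1) 1)
      = (pvFirstWin k (M.drop j)).map (fun i => ((j + i : Nat) : Int)) := by
  intro t
  induction t with
  | zero =>
    intro j hj
    rw [PySem.List.pyRange_one_eq_nil (by omega)]
    rw [pvFirstWin_none_of_short (by simp; omega)]
    rfl
  | succ t ih =>
    intro j hj
    by_cases hwin : j + k ≤ M.length
    · rw [PySem.List.pyRange_one_cons (by omega)]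
      simp only [pvLoopB]
      rw [show ((j : Int) + (k : Int)) = ((j : Int) + ((k : Nat) : Int)) by rfl,
        PySem.List.slice_natCast_add]
      by_cases hall : ((M.drop j).take k).all id = true
      · rw [if_pos hall]
        rw [pvFirstWin_eq_some_zero (by
            intro h
            have := congrArg List.length h
            simp at this
            omega)
          (by simp; omega) hall]
        simp
      · rw [if_neg hall]
        rw [show ((j : Int) + 1) = (((j + 1 : Nat) : Int)) by push_cast; ring]
        rw [ih (j + 1) (by omega)]
        have hdrop : M.drop j = M[j] :: M.drop (j + 1) :=
          List.drop_eq_getElem_cons (by omega)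
        rw [hdrop]
        simp only [pvFirstWin]
        rw [if_neg (by
          rintro ⟨-, h2⟩
          exact hall (by rw [hdrop]; exact h2))]
        cases pvFirstWin k (M.drop (j + 1))
        · rfl
        · simp; ring
    · rw [PySem.List.pyRange_one_eq_nil (by omega)]
      rw [pvFirstWin_none_of_short (by simp; omega)]
      rfl

-- A never returns when cycle_size ≤ 0 (count only grows from 0 upward)
theorem pvLoopA_nonpos {cs : Int} (hcs : cs ≤ 0) :
    ∀ (l : List (Int × Int × Int)) (st : Option Int) (count : Int), 0 ≤ count →
    pvLoopA l st count cs = none := by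
  intro l
  induction l with
  | nil => intro st count _; rfl
  | cons q rest ih =>
    intro st count hcount
    obtain ⟨rn, a, b⟩ := q
    simp only [pvLoopA]
    by_cases hab : (a == b) = true
    · rw [if_pos hab]
      rw [if_neg (by simp; omega)]
      exact ih _ _ (by omega)
    · rw [if_neg hab]
      exact ih _ _ le_rfl

-- the two match tables coincide
theorem pvMatches_eq (chamber : List Int) (k : Nat) :
    (PySem.List.pyRange 0 ((chamber.length : Int) - (k : Int)) 1).map
        (fun i => PySem.List.pyGetD chamber i 0 == PySem.List.pyGetD chamber (i + (k : Int)) 0)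
      = (List.zip chamber (chamber.drop k)).map (fun q => q.1 == q.2) := by
  apply List.ext_getElem
  · simp [PySem.List.length_pyRange_one]
  · intro m h1 h2
    have hm : m < chamber.length - k := by
      simp [PySem.List.length_pyRange_one] at h1
      omega
    simp only [List.getElem_map, PySem.List.getElem_pyRange_one, List.getElem_zip]
    rw [show ((0 : Int) + (m : Nat)) = ((m : Nat) : Int) by ring]
    rw [show ((m : Nat) : Int) + ((k : Nat) : Int) = (((m + k : Nat)) : Int) by push_cast; ring]
    rw [PySem.List.pyGetD_natCast, PySem.List.pyGetD_natCast]
    rw [List.getElem_drop]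
    rw [List.getD_eq_getElem _ _ (by omega), List.getD_eq_getElem _ _ (by omega)]
    congr 2
    omega

-- ===== VERDICT (by name: the statement is the Claim_ definition above) =====
theorem find_first_cycle_spec : Claim_equal_find_first_cycle := by
  intro chamber cycle_size _
  unfold Spec_find_first_cycle find_first_cycle find_first_cycle_alt
  by_cases hcs : cycle_size ≤ 0
  · rw [if_pos hcs]
    exact pvLoopA_nonpos hcs _ _ _ le_rfl
  · rw [if_neg hcs]
    obtain ⟨k, hk⟩ : ∃ k : Nat, cycle_size = (k : Int) :=
      ⟨cycle_size.toNat, by omega⟩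
    subst hk
    have hk1 : 1 ≤ k := by omega
    simp only []
    rw [PySem.List.slice_from_natCast]
    have hA := pvLoopA_inv hk1 (chamber.zip (chamber.drop k)) 0 0 hk1
    rw [if_pos rfl] at hA
    simp only [Nat.cast_zero, List.replicate, List.nil_append, sub_zero, zero_add] at hA
    rw [hA, pvMatches_eq chamber k]
    have hB := pvLoopB_inv hk1
      ((chamber.zip (chamber.drop k)).map (fun q => q.1 == q.2))
      ((chamber.zip (chamber.drop k)).map (fun q => q.1 == q.2)).length 0 (by omega)
    simp only [Nat.cast_zero, List.drop_zero, zero_add] at hB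
    rw [hB]
    cases pvFirstWin k ((chamber.zip (chamber.drop k)).map (fun q => q.1 == q.2))
    · rfl
    · simp
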